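-- pv_equiv track=rewrite | github.com/chubawithwings/Chubenko-python | PZ_6/PZ_6_1.py | spisok
-- ===== SOURCE A (Python) =====
-- def spisok(numbers):
--     first_even = None
--     for num in numbers:
--         if num % 2 == 0:
--             first_even = num
--             break
--
--     if first_even is None:
--         return numbers
--
--     modified_numbers = numbers[:]
--
--     for i, num in enumerate(modified_numbers):
--         if num % 2 == 0:
--             modified_numbers[i] += first_even
--     return modified_numbers
-- ===== SOURCE B (Python) =====
-- def spisok(numbers):
--     result = []
--     first_even = None
--     for num in numbers:
--         if num % 2 == 0:
--             if first_even is None: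
--                 first_even = num
--             result.append(num + first_even)
--         else:
--             result.append(num)
--     return numbers if first_even is None else result
-- ===== Notes on version B (the rewrite author's own statement) =====
-- stated objective: simpler
-- what changed: Single pass building the result while maintaining first_even, instead of A's two passes (find first even, then copy-and-mutate via enumerate).
import Mathlib
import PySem

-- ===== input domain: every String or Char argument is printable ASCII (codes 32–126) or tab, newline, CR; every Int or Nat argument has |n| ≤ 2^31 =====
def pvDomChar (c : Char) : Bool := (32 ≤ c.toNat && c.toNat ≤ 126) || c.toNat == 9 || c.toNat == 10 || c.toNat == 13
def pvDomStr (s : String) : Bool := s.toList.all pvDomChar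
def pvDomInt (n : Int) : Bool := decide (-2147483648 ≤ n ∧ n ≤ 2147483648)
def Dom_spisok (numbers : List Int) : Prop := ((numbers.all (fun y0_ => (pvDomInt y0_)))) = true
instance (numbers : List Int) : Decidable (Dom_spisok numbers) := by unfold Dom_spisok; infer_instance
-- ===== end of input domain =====

-- B fuses A's two passes into one, maintaining first_even while building the result.
-- Equivalence is about the RETURN VALUE (the value returned in the no-even case equals the input either way).

-- ===== PORT A =====
-- first loop of A: scan for the first even number, breaking when found
def spisokFindFE : List Int → Option Int
  | [] => none
  | num :: rest => if PySem.Int.mod num 2 == 0 then some num else spisokFindFE rest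

def spisok (numbers : List Int) : List Int :=
  match spisokFindFE numbers with
  | none => numbers
  | some first_even =>
    -- second loop: enumerate over the copy, adding first_even to each even element in place
    numbers.map (fun num => if PySem.Int.mod num 2 == 0 then num + first_even else num)

-- ===== PORT B =====
-- single pass: carries first_even, returns (final first_even, built result list)
def spisokBLoop : Option Int → List Int → Option Int × List Int
  | fe, [] => (fe, [])
  | fe, num :: rest =>
    if PySem.Int.mod num 2 == 0 then
      let fe' := match fe with | none => some num | some f => some f
      let r := spisokBLoop fe' rest
      (r.1, (num + (match fe' with | none => num | some f => f)) :: r.2)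
    else
      let r := spisokBLoop fe rest
      (r.1, num :: r.2)

def spisok_alt (numbers : List Int) : List Int :=
  let r := spisokBLoop none numbers
  match r.1 with
  | none => numbers
  | some _ => r.2

-- ===== PRECONDITION & SPEC =====
def Spec_spisok (numbers : List Int) (out : List Int) : Prop := out = spisok_alt numbers
instance (numbers : List Int) (out : List Int) : Decidable (Spec_spisok numbers out) := by unfold Spec_spisok; infer_instance

-- ===== CLAIM (what is proved, stated in full; the proofs are below) =====
def Claim_equal_spisok : Prop := ∀ (numbers : List Int), Dom_spisok numbers → Spec_spisok numbers (spisok numbers)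

-- ===== LEMMAS AND PROOFS =====

-- once first_even is set, B's loop never changes it and just maps over the rest
theorem spisokBLoop_some (f : Int) (xs : List Int) :
    spisokBLoop (some f) xs =
      (some f, xs.map (fun num => if PySem.Int.mod num 2 == 0 then num + f else num)) := by
  induction xs with
  | nil => rfl
  | cons x rest ih =>
    simp only [spisokBLoop, List.map]
    split_ifs with h <;> simp [ih]

-- B's loop from the initial state, characterised by A's first-even search
theorem spisokBLoop_none (xs : List Int) :
    spisokBLoop none xs =
      match spisokFindFE xs with
      | none => (none, xs)
      | some f => (some f, xs.map (fun num => if PySem.Int.mod num 2 == 0 then num + f else num)) := by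
  induction xs with
  | nil => rfl
  | cons x rest ih =>
    simp only [spisokBLoop, spisokFindFE]
    split_ifs with h
    · rw [spisokBLoop_some]
      simp only [List.map]
      rw [if_pos h]
    · rw [ih]
      cases hf : spisokFindFE rest
      · simp
      · simp only [List.map]
        rw [if_neg h]

-- ===== VERDICT (by name: the statement is the Claim_ definition above) =====
theorem spisok_spec : Claim_equal_spisok := by
  intro numbers _
  unfold Spec_spisok spisok spisok_alt
  rw [spisokBLoop_none]
  cases h : spisokFindFE numbers <;> simp
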